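-- pv_equiv track=rewrite | github.com/jimhorng/algorithm | min_cpu_run_task/prob3_sol4.py | _feasible_with_k
-- ===== SOURCE A (Python) =====
-- def _feasible_with_k(tasks: list[tuple[int, int]], task_length: int, num_cpus: int) -> bool:
--     """
--     Hall's condition for identical-job parallel machine scheduling.
--
--     tasks : list of (release_time, latest_start).
--     Returns True iff, for every interval [a, b) formed by critical points,
--     the number of tasks contained within it does not exceed
--     num_cpus * floor((b - a) / task_length).
--     """
--     releases = [r for r, _ in tasks]
--     deadlines = [ls + task_length for _, ls in tasks]
--     critical = sorted(set(releases + deadlines))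
--
--     for ai, a in enumerate(critical):
--         for b in critical[ai + 1:]:
--             capacity = num_cpus * ((b - a) // task_length)
--             demand = sum(1 for r, d in zip(releases, deadlines) if r >= a and d <= b)
--             if demand > capacity:
--                 return False
--     return True
-- ===== SOURCE B (Python) =====
-- def _feasible_with_k(tasks: list[tuple[int, int]], task_length: int, num_cpus: int) -> bool:
--     releases = [r for r, _ in tasks]
--     deadlines = [ls + task_length for _, ls in tasks]
--     critical = sorted(set(releases + deadlines))
--
--     for ai, a in enumerate(critical):
--         # deadlines of the tasks released at or after a, ascending
--         ds = sorted(ls + task_length for r, ls in tasks if r >= a)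
--         j = 0  # two-pointer: ds[:j] are exactly the admissible deadlines <= current b
--         for b in critical[ai + 1:]:
--             while j < len(ds) and ds[j] <= b:
--                 j += 1
--             if j > num_cpus * ((b - a) // task_length):
--                 return False
--     return True
-- ===== Notes on version B (the rewrite author's own statement) =====
-- stated objective: faster
-- what changed: The inner per-pair O(n) re-count of admissible tasks is replaced, for each left endpoint a, by one sorted list of admissible deadlines swept with a two-pointer as b increases, so each (a,b) check is amortised O(1).
import Mathlib
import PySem

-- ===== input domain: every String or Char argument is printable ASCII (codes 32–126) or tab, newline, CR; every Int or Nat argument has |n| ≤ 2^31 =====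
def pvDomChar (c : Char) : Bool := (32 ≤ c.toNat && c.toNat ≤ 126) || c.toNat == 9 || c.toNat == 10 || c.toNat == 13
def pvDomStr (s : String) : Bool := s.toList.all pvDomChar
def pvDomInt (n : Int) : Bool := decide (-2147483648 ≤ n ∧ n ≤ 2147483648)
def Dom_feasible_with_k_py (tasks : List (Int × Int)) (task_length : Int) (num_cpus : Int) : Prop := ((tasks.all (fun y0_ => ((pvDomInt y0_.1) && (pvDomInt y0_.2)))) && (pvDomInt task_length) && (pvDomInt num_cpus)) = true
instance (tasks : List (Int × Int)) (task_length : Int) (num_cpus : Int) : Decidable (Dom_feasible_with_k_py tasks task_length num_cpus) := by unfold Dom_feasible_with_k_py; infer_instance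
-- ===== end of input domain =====

-- B replaces A's per-pair O(n) re-count by one sorted admissible-deadline list per left
-- endpoint, swept with a two-pointer as b increases (objective: faster).

-- ===== PORT A =====
-- inner 'for b in critical[ai+1:]' with early return; demand = sum(1 for ... if ...) = countP
def pyAInner (pairs : List (Int × Int)) (a task_length num_cpus : Int) : List Int → Bool
  | [] => true
  | b :: bs =>
      let capacity := num_cpus * PySem.Int.floordiv (b - a) task_length
      let demand : Nat := pairs.countP (fun rd => decide (rd.1 ≥ a) && decide (rd.2 ≤ b))
      if (demand : Int) > capacity then false else pyAInner pairs a task_length num_cpus bs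

-- outer 'for ai, a in enumerate(critical)'; critical[ai+1:] is the tail of the remaining list
def pyAOuter (pairs : List (Int × Int)) (task_length num_cpus : Int) : List Int → Bool
  | [] => true
  | a :: rest =>
      if pyAInner pairs a task_length num_cpus rest then
        pyAOuter pairs task_length num_cpus rest
      else false

def feasible_with_k_py (tasks : List (Int × Int)) (task_length : Int) (num_cpus : Int) : Bool :=
  let releases := tasks.map (fun p => p.1)
  let deadlines := tasks.map (fun p => p.2 + task_length)
  let critical := PySem.List.sorted (PySem.Set.ofList (releases ++ deadlines)) (fun x => x) false
  pyAOuter (releases.zip deadlines) task_length num_cpus critical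

-- ===== PORT B =====
-- the 'while j < len(ds) and ds[j] <= b: j += 1' loop; the pair (rem, j) represents
-- the unscanned suffix ds[j:] together with the pointer j
def altAdvance (b : Int) : List Int → Nat → (List Int × Nat)
  | [], j => ([], j)
  | d :: rem, j => if d ≤ b then altAdvance b rem (j + 1) else (d :: rem, j)

-- the 'for b in critical[ai+1:]' loop carrying the pointer state
def altLoop (a task_length num_cpus : Int) : List Int → List Int → Nat → Bool
  | [], _, _ => true
  | b :: bs, rem, j =>
      let s := altAdvance b rem j
      if (s.2 : Int) > num_cpus * PySem.Int.floordiv (b - a) task_length then false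
      else altLoop a task_length num_cpus bs s.1 s.2

-- the 'for ai, a in enumerate(critical)' loop: per a, sorted admissible deadlines then sweep
def altOuter (tasks : List (Int × Int)) (task_length num_cpus : Int) : List Int → Bool
  | [] => true
  | a :: rest =>
      let ds := PySem.List.sorted
        ((tasks.filter (fun p => decide (p.1 ≥ a))).map (fun p => p.2 + task_length))
        (fun x => x) false
      if altLoop a task_length num_cpus rest ds 0 then
        altOuter tasks task_length num_cpus rest
      else false

def feasible_with_k_py_alt (tasks : List (Int × Int)) (task_length : Int) (num_cpus : Int) : Bool :=
  let releases := tasks.map (fun p => p.1)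
  let deadlines := tasks.map (fun p => p.2 + task_length)
  let critical := PySem.List.sorted (PySem.Set.ofList (releases ++ deadlines)) (fun x => x) false
  altOuter tasks task_length num_cpus critical

-- ===== PRECONDITION & SPEC =====
-- Pre_ excludes exactly the inputs on which Python A raises ZeroDivisionError:
-- task_length = 0 together with at least two distinct critical points (B raises there too).
def Pre_feasible_with_k_py (tasks : List (Int × Int)) (task_length : Int) (num_cpus : Int) : Prop :=
  task_length ≠ 0 ∨ ∀ p ∈ tasks, ∀ q ∈ tasks, p.1 = q.1 ∧ p.2 = q.2 ∧ p.1 = p.2 + task_length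
instance (tasks : List (Int × Int)) (task_length : Int) (num_cpus : Int) : Decidable (Pre_feasible_with_k_py tasks task_length num_cpus) := by unfold Pre_feasible_with_k_py; infer_instance

def pvWitness_feasible_with_k_py : (List (Int × Int)) × Int × Int := ([(0, 2), (1, 1)], 1, 1)

def Spec_feasible_with_k_py (tasks : List (Int × Int)) (task_length : Int) (num_cpus : Int) (out : Bool) : Prop := out = feasible_with_k_py_alt tasks task_length num_cpus
instance (tasks : List (Int × Int)) (task_length : Int) (num_cpus : Int) (out : Bool) : Decidable (Spec_feasible_with_k_py tasks task_length num_cpus out) := by unfold Spec_feasible_with_k_py; infer_instance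

-- ===== CLAIM (what is proved, stated in full; the proofs are below) =====
def Claim_equal_feasible_with_k_py : Prop := ∀ (tasks : List (Int × Int)) (task_length : Int) (num_cpus : Int), Dom_feasible_with_k_py tasks task_length num_cpus → Pre_feasible_with_k_py tasks task_length num_cpus → Spec_feasible_with_k_py tasks task_length num_cpus (feasible_with_k_py tasks task_length num_cpus)

-- ===== LEMMAS AND PROOFS =====

-- demand of the interval [a, b): tasks released at or after a with deadline at most b
def pvDem (tasks : List (Int × Int)) (task_length a b : Int) : Nat :=
  tasks.countP (fun p => decide (p.1 ≥ a) && decide (p.2 + task_length ≤ b))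

-- the common per-b check
def pvOk (tasks : List (Int × Int)) (task_length num_cpus a : Int) (b : Int) : Bool :=
  !((pvDem tasks task_length a b : Int) > num_cpus * PySem.Int.floordiv (b - a) task_length)

lemma pyAInner_eq_all (tasks : List (Int × Int)) (tl nc a : Int) (bs : List Int) :
    pyAInner (tasks.map (fun p => (p.1, p.2 + tl))) a tl nc bs
      = bs.all (pvOk tasks tl nc a) := by
  induction bs with
  | nil => rfl
  | cons b bs ih =>
      have hc : tasks.countP
          ((fun rd : Int × Int => decide (rd.1 ≥ a) && decide (rd.2 ≤ b)) ∘
            (fun p : Int × Int => (p.1, p.2 + tl)))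
          = pvDem tasks tl a b := rfl
      simp only [pyAInner, List.countP_map, hc, List.all_cons]
      by_cases h : (pvDem tasks tl a b : Int) > nc * PySem.Int.floordiv (b - a) tl
      · simp [pvOk, h]
      · simp [pvOk, h, ih]

-- the while loop splits the suffix at the first deadline beyond b
lemma altAdvance_eq (b : Int) :
    ∀ (rem : List Int) (j : Nat),
      altAdvance b rem j
        = (rem.dropWhile (fun d => decide (d ≤ b)),
           j + (rem.takeWhile (fun d => decide (d ≤ b))).length) := by
  intro rem
  induction rem with
  | nil => intro j; simp [altAdvance]
  | cons d rem ih =>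
      intro j
      by_cases h : d ≤ b
      · simp [altAdvance, h, ih]
        omega
      · simp [altAdvance, h]

lemma countP_le_of_sorted (ds : List Int) (b : Int) (hs : ds.Pairwise (· ≤ ·)) :
    ds.countP (fun d => decide (d ≤ b)) = (ds.takeWhile (fun d => decide (d ≤ b))).length := by
  induction ds with
  | nil => rfl
  | cons d ds ih =>
      rcases List.pairwise_cons.mp hs with ⟨hd, hs'⟩
      by_cases h : d ≤ b
      · simp [h, ih hs']
      · have hz : ds.countP (fun d => decide (d ≤ b)) = 0 := by
          rw [List.countP_eq_zero]
          intro x hx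
          simp only [decide_eq_true_eq]
          intro hxb
          exact h (le_trans (hd x hx) hxb)
        simp [h, hz]

lemma altLoop_eq_all (tasks : List (Int × Int)) (tl nc a : Int) :
    ∀ (bs rem : List Int) (j : Nat), rem.Pairwise (· ≤ ·) → bs.Pairwise (· ≤ ·) →
      (∀ b ∈ bs, j + rem.countP (fun d => decide (d ≤ b)) = pvDem tasks tl a b) →
      altLoop a tl nc bs rem j = bs.all (pvOk tasks tl nc a) := by
  intro bs
  induction bs with
  | nil => intro rem j _ _ _; rfl
  | cons b bs ih =>
      intro rem j hrem hbs hinv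
      rcases List.pairwise_cons.mp hbs with ⟨hb, hbs'⟩
      set tw := rem.takeWhile (fun d => decide (d ≤ b)) with htw
      set dw := rem.dropWhile (fun d => decide (d ≤ b)) with hdw
      have hsplit : rem = tw ++ dw := (List.takeWhile_append_dropWhile ..).symm
      have htwb : ∀ x ∈ tw, x ≤ b := by
        intro x hx
        simpa using List.mem_takeWhile_imp hx
      -- the pointer after the while loop equals the demand of [a, b)
      have hcount : j + tw.length = pvDem tasks tl a b := by
        rw [← hinv b (List.mem_cons_self ..), countP_le_of_sorted rem b hrem]
      -- the invariant for the remaining right endpoints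
      have hinv' : ∀ b' ∈ bs, (j + tw.length) + dw.countP (fun d => decide (d ≤ b'))
          = pvDem tasks tl a b' := by
        intro b' hb'
        have hbb' : b ≤ b' := hb b' hb'
        have hcnt : rem.countP (fun d => decide (d ≤ b'))
            = tw.length + dw.countP (fun d => decide (d ≤ b')) := by
          conv_lhs => rw [hsplit]
          rw [List.countP_append]
          have : tw.countP (fun d => decide (d ≤ b')) = tw.length :=
            List.countP_eq_length.mpr (fun x hx => by
              simpa using le_trans (htwb x hx) hbb')
          omega
        have := hinv b' (List.mem_cons_of_mem _ hb')
        omega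
      have hdwsorted : dw.Pairwise (· ≤ ·) :=
        hrem.sublist (List.dropWhile_sublist _)
      simp only [altLoop, altAdvance_eq, ← htw, ← hdw, List.all_cons]
      by_cases hcap : ((j + tw.length : Nat) : Int) > nc * PySem.Int.floordiv (b - a) tl
      · have : pvOk tasks tl nc a b = false := by
          simp only [pvOk, ← hcount]
          simpa using hcap
        simp [this]
        intro hle
        exfalso
        push_cast at hcap
        exact absurd hle (not_le.mpr hcap)
      · have hok : pvOk tasks tl nc a b = true := by
          simp only [pvOk, ← hcount]
          simpa using hcap
        simp only [hcap, if_false, hok, Bool.true_and]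
        exact ih dw (j + tw.length) hdwsorted hbs' hinv'

-- per-a facts about B's sorted admissible-deadline list
lemma ds_props (tasks : List (Int × Int)) (tl a : Int) :
    (PySem.List.sorted ((tasks.filter (fun p => decide (p.1 ≥ a))).map (fun p => p.2 + tl))
        (fun x => x) false).Pairwise (· ≤ ·)
    ∧ ∀ b : Int,
      (PySem.List.sorted ((tasks.filter (fun p => decide (p.1 ≥ a))).map (fun p => p.2 + tl))
        (fun x => x) false).countP (fun d => decide (d ≤ b)) = pvDem tasks tl a b := by
  constructor
  · simpa using PySem.List.sorted_pairwise
      ((tasks.filter (fun p => decide (p.1 ≥ a))).map (fun p => p.2 + tl)) (fun x => x)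
  · intro b
    have hperm := PySem.List.sorted_perm
      ((tasks.filter (fun p => decide (p.1 ≥ a))).map (fun p => p.2 + tl)) (fun x => x) false
    rw [hperm.countP_eq, List.countP_map, List.countP_filter]
    unfold pvDem
    congr 1
    funext p
    simp only [Function.comp]
    rw [Bool.and_comm]

lemma outer_eq (tasks : List (Int × Int)) (tl nc : Int) :
    ∀ crit : List Int, crit.Pairwise (· ≤ ·) →
      pyAOuter (tasks.map (fun p => (p.1, p.2 + tl))) tl nc crit
        = altOuter tasks tl nc crit := by
  intro crit
  induction crit with
  | nil => intro _; rfl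
  | cons a rest ih =>
      intro hp
      rcases List.pairwise_cons.mp hp with ⟨_, hrest⟩
      simp only [pyAOuter, altOuter]
      rw [pyAInner_eq_all]
      rcases ds_props tasks tl a with ⟨hs, hd⟩
      rw [altLoop_eq_all tasks tl nc a rest _ 0 hs hrest (fun b _ => by simpa using hd b)]
      rw [ih hrest]

-- ===== VERDICT (by name: the statement is the Claim_ definition above) =====
theorem feasible_with_k_py_spec : Claim_equal_feasible_with_k_py := by
  intro tasks tl nc _ _
  unfold Spec_feasible_with_k_py feasible_with_k_py feasible_with_k_py_alt
  simp only [List.zip_map']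
  have hcrit : (PySem.List.sorted
      (PySem.Set.ofList (tasks.map (fun p => p.1) ++ tasks.map (fun p => p.2 + tl)))
      (fun x => x) false).Pairwise (· ≤ ·) :=
    (PySem.List.sorted_ofList_pairwise_lt _).imp (fun h => le_of_lt h)
  exact outer_eq tasks tl nc _ hcrit
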